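-- pv_equiv track=rewrite | github.com/Iker-Jimenez/2020_Advent_of_Code | day05/puzzel1.py | rec_calc_row
-- ===== SOURCE A (Python) =====
-- def rec_calc_row(rowcode, rows):
--     len_rows = len(rows)
--     if len_rows > 2:
--         if rowcode[0] == "F":
--             return rec_calc_row(rowcode[1:], rows[0:int(len_rows/2)])
--         else:
--             return rec_calc_row(rowcode[1:], rows[int(len_rows/2):])
--     else:
--         if rowcode == "F":
--             return rows[0]
--         else:
--             return rows[1]
-- ===== SOURCE B (Python) =====
-- def rec_calc_row(rowcode, rows):
--     lo, hi = 0, len(rows)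
--     i = 0
--     while hi - lo > 2:
--         if rowcode[i] == "F":
--             hi = lo + (hi - lo) // 2
--         else:
--             lo = lo + (hi - lo) // 2
--         i += 1
--     if rowcode[i:] == "F":
--         return rows[lo]
--     else:
--         return rows[lo + 1]
-- ===== Notes on version B (the rewrite author's own statement) =====
-- stated objective: faster
-- what changed: Replaces A's recursion that copies a half of the rows list (and of the code string) at every step by a single two-pointer loop (lo/hi indices into the original list, one index into the code), so no slices are ever built.
import Mathlib
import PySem

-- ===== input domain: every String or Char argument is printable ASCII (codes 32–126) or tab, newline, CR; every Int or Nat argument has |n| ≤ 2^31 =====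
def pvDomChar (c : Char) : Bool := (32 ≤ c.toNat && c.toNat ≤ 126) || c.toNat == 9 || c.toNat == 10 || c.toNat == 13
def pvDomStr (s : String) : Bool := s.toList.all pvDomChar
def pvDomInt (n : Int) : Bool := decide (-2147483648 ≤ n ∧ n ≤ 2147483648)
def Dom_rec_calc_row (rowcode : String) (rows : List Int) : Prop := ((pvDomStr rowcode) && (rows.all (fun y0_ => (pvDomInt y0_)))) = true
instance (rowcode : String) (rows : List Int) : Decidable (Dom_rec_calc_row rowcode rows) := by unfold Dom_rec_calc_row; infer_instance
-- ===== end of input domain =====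

-- B replaces A's recursion on list/string slices by a single index loop over the
-- code characters (two pointers lo/hi into the original list, no copying).

-- ===== PORT A =====
-- literal transliteration of A: recursion slicing rows in half each step.
-- On inputs where Python raises IndexError (excluded by Pre_) the port returns 0.
def pvRecA (code : List Char) (rows : List Int) : Int :=
  if _h : rows.length > 2 then
    if code.getD 0 ' ' = 'F' then
      pvRecA (code.drop 1) (rows.take (rows.length / 2))
    else
      pvRecA (code.drop 1) (rows.drop (rows.length / 2))
  else
    if code = ['F'] then (rows[0]?).getD 0 else (rows[1]?).getD 0
termination_by rows.length
decreasing_by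
  · simp; omega
  · simp; omega

def rec_calc_row (rowcode : String) (rows : List Int) : Int :=
  pvRecA rowcode.toList rows

-- ===== PORT B =====
-- literal transliteration of Source B's while-loop: state (lo, hi, i), no slicing.
def pvRecB (rows : List Int) (code : List Char) (lo hi i : Nat) : Int :=
  if _h : hi - lo > 2 then
    if code.getD i ' ' = 'F' then
      pvRecB rows code lo (lo + (hi - lo) / 2) (i + 1)
    else
      pvRecB rows code (lo + (hi - lo) / 2) hi (i + 1)
  else
    if code.drop i = ['F'] then (rows[lo]?).getD 0 else (rows[lo + 1]?).getD 0
termination_by hi - lo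
decreasing_by
  · omega
  · omega

def rec_calc_row_alt (rowcode : String) (rows : List Int) : Int :=
  pvRecB rows rowcode.toList 0 rows.length 0

-- ===== PRECONDITION & SPEC =====
-- pvE code k = Σ_{j<k} [code[j] ≠ 'F']·2^j ; pvSz code n k = ⌊(n + pvE code k)/2^k⌋
-- is the size of the surviving segment after k halving steps.
def pvE (code : List Char) (k : Nat) : Nat :=
  match k with
  | 0 => 0
  | k + 1 => pvE code k + (if code.getD k ' ' = 'F' then 0 else 2 ^ k)

def pvSz (code : List Char) (n k : Nat) : Nat := (n + pvE code k) / 2 ^ k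

-- Pre_ holds exactly on the inputs where the Python A returns normally (elsewhere
-- A raises IndexError): the halving process reaches a segment of size ≤ 2 before
-- the code string runs out, and that segment is large enough for the final access.
def Pre_rec_calc_row (rowcode : String) (rows : List Int) : Prop :=
  ∃ k, k ≤ rowcode.toList.length ∧
    (∀ j, j < k → pvSz rowcode.toList rows.length j > 2) ∧
    pvSz rowcode.toList rows.length k ≤ 2 ∧
    (if rowcode.toList.drop k = ['F'] then 1 ≤ pvSz rowcode.toList rows.length k
     else 2 ≤ pvSz rowcode.toList rows.length k)

instance (rowcode : String) (rows : List Int) : Decidable (Pre_rec_calc_row rowcode rows) := by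
  unfold Pre_rec_calc_row
  have : ∀ P : Nat → Prop, [DecidablePred P] →
      Decidable (∃ k, k ≤ rowcode.toList.length ∧ P k) := by
    intro P _
    exact decidable_of_iff (∃ k < rowcode.toList.length + 1, P k)
      (by constructor <;> rintro ⟨k, h1, h2⟩ <;> exact ⟨k, by omega, h2⟩)
  exact this _

def pvWitness_rec_calc_row : String × List Int := ("FB", [1, 2, 3, 4])

def Spec_rec_calc_row (rowcode : String) (rows : List Int) (out : Int) : Prop := out = rec_calc_row_alt rowcode rows
instance (rowcode : String) (rows : List Int) (out : Int) : Decidable (Spec_rec_calc_row rowcode rows out) := by unfold Spec_rec_calc_row; infer_instance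

-- ===== CLAIM (what is proved, stated in full; the proofs are below) =====
def Claim_equal_rec_calc_row : Prop := ∀ (rowcode : String) (rows : List Int), Dom_rec_calc_row rowcode rows → Pre_rec_calc_row rowcode rows → Spec_rec_calc_row rowcode rows (rec_calc_row rowcode rows)

-- ===== LEMMAS AND PROOFS =====

-- Good code n : the recursion of A terminates with a successful access.
def pvGood (code : List Char) (n : Nat) : Prop :=
  if _h : n > 2 then
    match code with
    | [] => False
    | c :: cs => pvGood cs (if c = 'F' then n / 2 else n - n / 2)
  else
    if code = ['F'] then 1 ≤ n else 2 ≤ n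
termination_by n
decreasing_by all_goals (split <;> omega)

lemma pvGood_le (code : List Char) (n : Nat) (h : ¬ n > 2) :
    pvGood code n = if code = ['F'] then 1 ≤ n else 2 ≤ n := by
  rw [pvGood.eq_def, dif_neg h]

lemma pvGood_cons (c : Char) (cs : List Char) (n : Nat) (h : n > 2) :
    pvGood (c :: cs) n = pvGood cs (if c = 'F' then n / 2 else n - n / 2) := by
  rw [pvGood.eq_def, dif_pos h]

lemma pvE_cons (c : Char) (cs : List Char) (k : Nat) :
    pvE (c :: cs) (k + 1) = (if c = 'F' then 0 else 1) + 2 * pvE cs k := by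
  induction k with
  | zero => simp [pvE]
  | succ k ih =>
      show pvE (c :: cs) (k + 1) + _ = _
      rw [ih]
      simp only [pvE, List.getD_cons_succ]
      split_ifs <;> ring

lemma pvSz_cons (c : Char) (cs : List Char) (n k : Nat) :
    pvSz (c :: cs) n (k + 1) = pvSz cs (if c = 'F' then n / 2 else n - n / 2) k := by
  unfold pvSz
  rw [pvE_cons]
  have h2 : (2 : Nat) ^ (k + 1) = 2 * 2 ^ k := by ring
  rw [h2, ← Nat.div_div_eq_div_mul]
  congr 1
  split_ifs with hc
  · omega
  · omega

lemma pvSz_zero (code : List Char) (n : Nat) : pvSz code n 0 = n := by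
  simp [pvSz, pvE]

lemma pre_to_good : ∀ (k : Nat) (code : List Char) (n : Nat),
    k ≤ code.length →
    (∀ j, j < k → pvSz code n j > 2) →
    pvSz code n k ≤ 2 →
    (if code.drop k = ['F'] then 1 ≤ pvSz code n k else 2 ≤ pvSz code n k) →
    pvGood code n := by
  intro k
  induction k with
  | zero =>
      intro code n _ _ hle hfin
      have h0 := pvSz_zero code n
      rw [h0] at hle hfin
      simp only [List.drop_zero] at hfin
      rw [pvGood_le code n (by omega)]
      exact hfin
  | succ k ih =>
      intro code n hk hj hle hfin
      have hn : n > 2 := by have := hj 0 (by omega); rwa [pvSz_zero] at this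
      match code with
      | [] => simp at hk
      | c :: cs =>
          rw [pvGood_cons c cs n hn]
          apply ih cs (if c = 'F' then n / 2 else n - n / 2)
          · simpa using hk
          · intro j hjk
            have := hj (j + 1) (by omega)
            rwa [pvSz_cons] at this
          · rw [← pvSz_cons]; exact hle
          · rw [← pvSz_cons]
            simpa using hfin

lemma main_lemma (code : List Char) (rows : List Int) (lo hi i : Nat)
    (h1 : lo ≤ hi) (h2 : hi ≤ rows.length) (hg : pvGood (code.drop i) (hi - lo)) :
    pvRecA (code.drop i) ((rows.drop lo).take (hi - lo)) = pvRecB rows code lo hi i := by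
  have hslen : ((rows.drop lo).take (hi - lo)).length = hi - lo := by
    simp; omega
  rw [pvRecA, pvRecB]
  rw [hslen]
  by_cases hbig : hi - lo > 2
  · -- recursive case
    simp only [hbig, dite_true]
    obtain ⟨c, cs, hcons⟩ : ∃ c cs, code.drop i = c :: cs := by
      cases hcd : code.drop i with
      | nil => rw [hcd, pvGood.eq_def, dif_pos hbig] at hg; exact absurd hg (by simp)
      | cons c cs => exact ⟨c, cs, rfl⟩
    rw [hcons, pvGood_cons c cs _ hbig] at hg
    have htail : (code.drop i).drop 1 = code.drop (i + 1) := by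
      rw [List.drop_drop]
    have hcs : cs = code.drop (i + 1) := by
      rw [← htail, hcons, List.drop_one, List.tail_cons]
    have hhead : code.getD i ' ' = c := by
      have h0 : (code.drop i)[0]? = code[i + 0]? := List.getElem?_drop ..
      rw [hcons] at h0
      simp only [List.getElem?_cons_zero, Nat.add_zero] at h0
      simp [List.getD, ← h0]
    rw [hcs] at hg
    simp only [hcons, List.getD_cons_zero, hhead]
    rw [← hcons, htail]
    by_cases hc : c = 'F'
    · simp only [hc] at hg ⊢
      have htake : ((rows.drop lo).take (hi - lo)).take ((hi - lo) / 2)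
          = (rows.drop lo).take ((lo + (hi - lo) / 2) - lo) := by
        rw [List.take_take]; congr 1; omega
      rw [htake]
      apply main_lemma code rows lo (lo + (hi - lo) / 2) (i + 1) (by omega) (by omega)
      have : lo + (hi - lo) / 2 - lo = (hi - lo) / 2 := by omega
      rw [this]
      simpa [hc] using hg
    · simp only [hc] at hg ⊢
      have hdropt : ((rows.drop lo).take (hi - lo)).drop ((hi - lo) / 2)
          = (rows.drop (lo + (hi - lo) / 2)).take (hi - (lo + (hi - lo) / 2)) := by
        rw [List.drop_take]
        rw [List.drop_drop]
        congr 1; omega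
      rw [hdropt]
      apply main_lemma code rows (lo + (hi - lo) / 2) hi (i + 1) (by omega) (by omega)
      have : hi - (lo + (hi - lo) / 2) = (hi - lo) - (hi - lo) / 2 := by omega
      rw [this]
      simpa [hc] using hg
  · -- base case
    rw [pvGood_le _ _ hbig] at hg
    simp only [hbig, dite_false]
    split_ifs at hg ⊢ with hF
    · -- remaining code = ['F'], segment size ≥ 1
      have : ((rows.drop lo).take (hi - lo))[0]? = rows[lo]? := by
        rw [List.getElem?_take_of_lt (by omega)]
        rw [List.getElem?_drop]
        norm_num
      rw [this]
    · -- segment size ≥ 2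
      have : ((rows.drop lo).take (hi - lo))[1]? = rows[lo + 1]? := by
        rw [List.getElem?_take_of_lt (by omega)]
        rw [List.getElem?_drop]
      rw [this]
termination_by hi - lo
decreasing_by all_goals omega

-- ===== VERDICT (by name: the statement is the Claim_ definition above) =====
theorem rec_calc_row_spec : Claim_equal_rec_calc_row := by
  intro rowcode rows _hd hpre
  unfold Spec_rec_calc_row rec_calc_row rec_calc_row_alt
  obtain ⟨k, hk, hj, hle, hfin⟩ := hpre
  have hg : pvGood rowcode.toList rows.length := pre_to_good k _ _ hk hj hle hfin
  have := main_lemma rowcode.toList rows 0 rows.length 0 (by omega) (by omega)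
    (by simpa using hg)
  simpa using this
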